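-- pv_equiv track=rewrite | github.com/Arilson-X/Desafio-Python-Syngenta | src/my_module.py | calcula_valor_Lakewood
-- ===== SOURCE A (Python) =====
-- def calcula_valor_Lakewood(cliente,list_data):
--     soma = 0
--     if(cliente == "Regular:"):
--         for data in list_data:
--             if(data.find("(sun)") != -1 or  data.find("(sat)") != -1):
--                 soma = soma + 90
--             else:
--                 soma = soma + 110
--         return soma
--     else:
--         for data in list_data:
--             soma = soma + 80
--         return soma
-- ===== SOURCE B (Python) =====
-- def calcula_valor_Lakewood(cliente, list_data):
--     if cliente == "Regular:":
--         weekend = sum(1 for data in list_data if "(sun)" in data or "(sat)" in data)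
--         return 110 * len(list_data) - 20 * weekend
--     else:
--         return 80 * len(list_data)
-- ===== Notes on version B (the rewrite author's own statement) =====
-- stated objective: simpler
-- what changed: Replaced the per-element running accumulator with closed forms: 80*len for non-Regular clients, and 110*len - 20*weekend_count for Regular (counting dates containing '(sun)' or '(sat)').
import Mathlib
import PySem

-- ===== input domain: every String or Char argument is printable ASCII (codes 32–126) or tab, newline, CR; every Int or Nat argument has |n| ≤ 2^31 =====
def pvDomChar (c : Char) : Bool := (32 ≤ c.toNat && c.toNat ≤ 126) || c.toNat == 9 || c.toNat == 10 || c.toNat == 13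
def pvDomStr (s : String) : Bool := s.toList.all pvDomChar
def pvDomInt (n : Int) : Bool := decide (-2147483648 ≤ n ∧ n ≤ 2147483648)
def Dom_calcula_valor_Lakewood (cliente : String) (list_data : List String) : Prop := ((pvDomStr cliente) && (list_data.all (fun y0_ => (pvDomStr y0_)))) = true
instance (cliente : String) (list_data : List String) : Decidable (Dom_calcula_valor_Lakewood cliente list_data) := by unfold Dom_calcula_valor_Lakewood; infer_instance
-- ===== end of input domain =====

-- B replaces A's running accumulator with closed forms (80*len, and 110*len - 20*weekend_count); objective: simpler.

-- ===== PORT A =====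
-- literal transliteration: fold carrying the accumulator `soma`
def calcula_valor_Lakewood (cliente : String) (list_data : List String) : Int :=
  if cliente == "Regular:" then
    list_data.foldl (fun soma data =>
      if PySem.Str.find data "(sun)" ≠ -1 ∨ PySem.Str.find data "(sat)" ≠ -1 then
        soma + 90
      else
        soma + 110) 0
  else
    list_data.foldl (fun soma _ => soma + 80) 0

-- ===== PORT B =====
def calcula_valor_Lakewood_alt (cliente : String) (list_data : List String) : Int :=
  if cliente == "Regular:" then
    let weekend : Nat :=
      (list_data.filter (fun data => PySem.Str.isIn "(sun)" data || PySem.Str.isIn "(sat)" data)).length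
    110 * (list_data.length : Int) - 20 * (weekend : Int)
  else
    80 * (list_data.length : Int)

-- ===== PRECONDITION & SPEC =====
def Spec_calcula_valor_Lakewood (cliente : String) (list_data : List String) (out : Int) : Prop := out = calcula_valor_Lakewood_alt cliente list_data
instance (cliente : String) (list_data : List String) (out : Int) : Decidable (Spec_calcula_valor_Lakewood cliente list_data out) := by unfold Spec_calcula_valor_Lakewood; infer_instance

-- ===== CLAIM =====
def Claim_equal_calcula_valor_Lakewood : Prop := ∀ (cliente : String) (list_data : List String), Dom_calcula_valor_Lakewood cliente list_data → Spec_calcula_valor_Lakewood cliente list_data (calcula_valor_Lakewood cliente list_data)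

-- ===== LEMMAS AND PROOFS =====
-- A's per-element branch agrees with B's membership test
theorem pv_branch_eq (d : String) :
    (PySem.Str.find d "(sun)" ≠ -1 ∨ PySem.Str.find d "(sat)" ≠ -1) ↔
    (PySem.Str.isIn "(sun)" d || PySem.Str.isIn "(sat)" d) = true := by
  simp [PySem.Chars.find_ne_neg_one_iff, PySem.Chars.isIn_iff_infix]

-- generalized loop invariant for the Regular branch
theorem pv_regular_fold (l : List String) (s : Int) :
    l.foldl (fun soma data =>
      if PySem.Str.find data "(sun)" ≠ -1 ∨ PySem.Str.find data "(sat)" ≠ -1 then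
        soma + 90 else soma + 110) s
    = s + 110 * (l.length : Int)
        - 20 * ((l.filter (fun data => PySem.Str.isIn "(sun)" data || PySem.Str.isIn "(sat)" data)).length : Int) := by
  induction l generalizing s with
  | nil => simp
  | cons d t ih =>
    by_cases h : (PySem.Str.find d "(sun)" ≠ -1 ∨ PySem.Str.find d "(sat)" ≠ -1)
    · have hb : (PySem.Str.isIn "(sun)" d || PySem.Str.isIn "(sat)" d) = true := (pv_branch_eq d).mp h
      simp only [List.foldl_cons, if_pos h, ih, List.filter_cons, hb, if_true]
      push_cast [List.length_cons]; ring
    · have hb : ¬ (PySem.Str.isIn "(sun)" d || PySem.Str.isIn "(sat)" d) = true := fun hc => h ((pv_branch_eq d).mpr hc)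
      simp only [List.foldl_cons, if_neg h, ih, List.filter_cons, if_neg hb, List.length_cons]
      push_cast [List.length_cons]; ring

theorem pv_other_fold (l : List String) (s : Int) :
    l.foldl (fun soma _ => soma + 80) s = s + 80 * (l.length : Int) := by
  induction l generalizing s with
  | nil => simp
  | cons d t ih => simp [ih]; ring

-- ===== VERDICT =====
theorem calcula_valor_Lakewood_spec : Claim_equal_calcula_valor_Lakewood := by
  intro cliente list_data _
  unfold Spec_calcula_valor_Lakewood calcula_valor_Lakewood calcula_valor_Lakewood_alt
  by_cases h : (cliente == "Regular:") = true
  · rw [if_pos h, if_pos h, pv_regular_fold]; ring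
  · rw [if_neg h, if_neg h, pv_other_fold]; ring
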